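-- pv_equiv track=rewrite | github.com/hillaryke/news_correlation_10ac_week0 | src/utils.py | categorize_headlines
-- ===== SOURCE A (Python) =====
-- def categorize_headlines(headlines, tags):
--     # Initialize an empty list to store the categories
--     categories = []
--
--     # Iterate through the headlines
--     for headline in headlines:
--         # Convert the headline to lowercase
--         headline = headline.lower()
--
--         # Initialize a list to store the tags for the headline
--         headline_tags = []
--
--         # Iterate through the tags
--         for tag, keywords in tags.items():
--             # Check if any keyword for the tag is present in the headline
--             if any(keyword in headline for keyword in keywords):
--                 headline_tags.append(tag)
--
--         # If no tags were found, assign the "Other" tag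
--         if not headline_tags:
--             headline_tags.append("Other")
--
--         # Add the tags for the headline to the categories list
--         categories.append(', '.join(headline_tags))
--
--     return categories
-- ===== SOURCE B (Python) =====
-- def categorize_headlines(headlines, tags):
--     # Tag-major traversal: keep a (tags-so-far, lowered-headline) pair per headline
--     # and sweep each tag once over all headlines.
--     buckets = [([], h.lower()) for h in headlines]
--     for tag, keywords in tags.items():
--         buckets = [((b + [tag], low) if any(k in low for k in keywords) else (b, low))
--                    for b, low in buckets]
--     return [', '.join(b) if b else 'Other' for b, _ in buckets]
-- ===== Notes on version B (the rewrite author's own statement) =====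
-- stated objective: alternative
-- what changed: Loop interchange: instead of scanning all tags per headline, B sweeps each tag once across per-headline accumulator pairs (tag-major instead of headline-major traversal), finalizing with a join/Other pass.
import Mathlib
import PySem

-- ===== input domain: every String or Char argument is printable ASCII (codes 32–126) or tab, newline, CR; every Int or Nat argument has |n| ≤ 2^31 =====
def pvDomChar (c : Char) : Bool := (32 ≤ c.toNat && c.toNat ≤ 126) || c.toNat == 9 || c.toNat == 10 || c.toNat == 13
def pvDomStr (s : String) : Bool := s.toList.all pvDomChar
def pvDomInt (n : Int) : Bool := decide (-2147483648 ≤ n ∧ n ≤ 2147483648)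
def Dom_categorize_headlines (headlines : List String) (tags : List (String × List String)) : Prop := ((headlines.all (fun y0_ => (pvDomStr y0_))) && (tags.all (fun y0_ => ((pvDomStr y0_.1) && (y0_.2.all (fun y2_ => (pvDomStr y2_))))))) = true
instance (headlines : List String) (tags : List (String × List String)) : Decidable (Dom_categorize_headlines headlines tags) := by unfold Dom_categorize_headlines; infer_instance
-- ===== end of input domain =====

-- ===== PORT A =====
-- B's one honest line: B traverses tag-major (each tag swept once over per-headline
-- accumulators) instead of headline-major; an alternative traversal, not faster.
def categorize_headlines (headlines : List String) (tags : List (String × List String)) : List String :=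
  headlines.foldl (fun categories headline =>
    let low := PySem.Str.lower headline
    let headline_tags : List String := tags.foldl (fun ht p =>
      if p.2.any (fun keyword => PySem.Str.isIn keyword low) then ht ++ [p.1] else ht) []
    let headline_tags := if headline_tags = [] then headline_tags ++ ["Other"] else headline_tags
    categories ++ [PySem.Str.join ", " headline_tags]) []

-- ===== PORT B =====
def categorize_headlines_alt (headlines : List String) (tags : List (String × List String)) : List String :=
  let buckets : List (List String × String) := headlines.map (fun h => ([], PySem.Str.lower h))
  let buckets := tags.foldl (fun bs p =>
    bs.map (fun q =>
      if p.2.any (fun k => PySem.Str.isIn k q.2) then (q.1 ++ [p.1], q.2) else q)) buckets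
  buckets.map (fun q => if q.1 = [] then "Other" else PySem.Str.join ", " q.1)

-- ===== PRECONDITION & SPEC =====
def Spec_categorize_headlines (headlines : List String) (tags : List (String × List String)) (out : List String) : Prop := out = categorize_headlines_alt headlines tags
instance (headlines : List String) (tags : List (String × List String)) (out : List String) : Decidable (Spec_categorize_headlines headlines tags out) := by unfold Spec_categorize_headlines; infer_instance

-- ===== CLAIM (what is proved, stated in full; the proofs are below) =====
def Claim_equal_categorize_headlines : Prop := ∀ (headlines : List String) (tags : List (String × List String)), Dom_categorize_headlines headlines tags → Spec_categorize_headlines headlines tags (categorize_headlines headlines tags)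

-- ===== LEMMAS AND PROOFS =====

-- B's fold over tags commutes with the map over buckets.
theorem foldl_map_comm {a b : Type} (g : b -> a -> a) (tags : List b) (bs : List a) :
    tags.foldl (fun bs p => bs.map (g p)) bs
      = bs.map (fun q => tags.foldl (fun q p => g p q) q) := by
  induction tags generalizing bs with
  | nil => simp
  | cons p tl ih => simp [List.foldl_cons, ih, List.map_map, Function.comp]

-- B's per-bucket fold keeps the lowered headline fixed and collects what A's inner loop collects.
theorem row_eq (tags : List (String × List String)) (acc : List String) (low : String) :
    tags.foldl (fun (q : List String × String) p =>
        if p.2.any (fun k => PySem.Str.isIn k q.2) then (q.1 ++ [p.1], q.2) else q) (acc, low)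
      = (tags.foldl (fun ht p =>
          if p.2.any (fun k => PySem.Str.isIn k low) then ht ++ [p.1] else ht) acc, low) := by
  induction tags generalizing acc with
  | nil => rfl
  | cons p tl ih =>
    by_cases hc : (p.2.any (fun k => PySem.Str.isIn k low)) = true <;>
      simp only [List.foldl_cons, hc, ih, Bool.false_eq_true, ite_true, ite_false]

-- ===== VERDICT (by name: the statement is the Claim_ definition above) =====
theorem categorize_headlines_spec : Claim_equal_categorize_headlines := by
  intro headlines tags _
  unfold Spec_categorize_headlines categorize_headlines categorize_headlines_alt
  simp only [PySem.List.foldl_append_singleton_eq_map, foldl_map_comm, List.map_map,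
    List.nil_append]
  refine List.map_congr_left (fun h _ => ?_)
  simp only [Function.comp, row_eq]
  by_cases hL : (tags.foldl (fun ht p =>
      if p.2.any (fun k => PySem.Str.isIn k (PySem.Str.lower h)) then ht ++ [p.1] else ht)
      ([] : List String)) = []
  · simp only [hL, if_pos, List.nil_append]
    decide
  · simp only [hL, if_neg, not_false_iff]
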